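-- pv_equiv track=rewrite | github.com/MrBrainiacJ/cognithor | src/cognithor/learning/causal_attributor.py | _count_downstream
-- ===== SOURCE A (Python) =====
-- def _count_downstream(
--     step_id: str,
--     children_map: dict[str, list[str]],
-- ) -> int:
--     """BFS count of all transitive children of *step_id*."""
--     count = 0
--     queue = list(children_map.get(step_id, []))
--     while queue:
--         child = queue.pop(0)
--         count += 1
--         queue.extend(children_map.get(child, []))
--     return count
-- ===== SOURCE B (Python) =====
-- def _count_downstream(step_id, children_map):
--     """Count all transitive children of *step_id*, with multiplicity."""
--     def _count(s):
--         return sum(1 + _count(c) for c in children_map.get(s, []))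
--     return _count(step_id)
-- ===== Notes on version B (the rewrite author's own statement) =====
-- stated objective: simpler
-- what changed: Replaces the explicit BFS queue and counter with a direct recursive sum: count(s) = sum over children of (1 + count(child)); Pre_ excludes maps with a cycle reachable from step_id, on which A's BFS queue never empties (A loops forever) and B's recursion does not terminate either.
import Mathlib
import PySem

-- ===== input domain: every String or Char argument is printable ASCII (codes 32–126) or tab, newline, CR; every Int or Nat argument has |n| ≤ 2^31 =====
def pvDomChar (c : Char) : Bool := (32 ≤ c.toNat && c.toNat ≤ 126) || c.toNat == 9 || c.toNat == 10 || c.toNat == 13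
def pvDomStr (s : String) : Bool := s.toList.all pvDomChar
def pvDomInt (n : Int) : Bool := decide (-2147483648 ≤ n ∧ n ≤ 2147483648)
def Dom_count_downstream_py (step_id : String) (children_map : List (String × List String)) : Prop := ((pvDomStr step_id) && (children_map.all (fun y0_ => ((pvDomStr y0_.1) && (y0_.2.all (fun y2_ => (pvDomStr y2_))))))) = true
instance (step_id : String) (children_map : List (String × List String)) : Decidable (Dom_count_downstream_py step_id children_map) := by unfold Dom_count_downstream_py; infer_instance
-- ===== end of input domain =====

-- B replaces A's explicit BFS queue and counter by a direct recursive sum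
-- count(s) = Σ_{c ∈ children(s)} (1 + count(c)); the theorems are about the return value.

-- children_map.get(s, []) — shared by both ports (both Pythons call dict.get the same way)
def cdGet (g : List (String × List String)) (s : String) : List String :=
  (PySem.Dict.mk g).getD s []

-- ===== PORT A =====
-- while queue: child = queue.pop(0); count += 1; queue.extend(children_map.get(child, []))
-- (fuel is only a totality guard; under Pre_ it is large enough and never alters the run)
def bfsLoop (g : List (String × List String)) : Nat → Int → List String → Int
  | 0, count, _ => count
  | _ + 1, count, [] => count
  | n + 1, count, child :: rest => bfsLoop g n (count + 1) (rest ++ cdGet g child)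

def dmax (g : List (String × List String)) : Nat :=
  (g.map (fun p => p.2.length)).foldr max 0

def fuelA (g : List (String × List String)) (step_id : String) : Nat :=
  (cdGet g step_id).length * (dmax g + 1) ^ g.length + 1

def count_downstream_py (step_id : String) (children_map : List (String × List String)) : Int :=
  bfsLoop children_map (fuelA children_map step_id) 0 (cdGet children_map step_id)

-- ===== PORT B =====
-- def _count(s): return sum(1 + _count(c) for c in children_map.get(s, []))
-- (fuel is only a totality guard; under Pre_ the recursion depth never exceeds it)
def bCount (g : List (String × List String)) : Nat → String → Int
  | 0, _ => 0
  | n + 1, s => ((cdGet g s).map (fun c => 1 + bCount g n c)).sum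

def count_downstream_py_alt (step_id : String) (children_map : List (String × List String)) : Int :=
  bCount children_map (children_map.length + 1) step_id

-- ===== PRECONDITION & SPEC =====
-- reachability closure: one step adds all children, iterated enough times to reach the fixpoint
def clStep (g : List (String × List String)) (S : List String) : List String :=
  (S ++ S.flatMap (cdGet g)).dedup

def clIter (g : List (String × List String)) : Nat → List String → List String
  | 0, S => S
  | n + 1, S => clStep g (clIter g n S)

def clo (g : List (String × List String)) (S : List String) : List String :=
  clIter g ((S ++ g.flatMap Prod.snd).length + 1) S

-- Pre_ excludes exactly the inputs on which A never returns: maps with a cycle reachable from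
-- step_id, where A's BFS queue never empties (A loops forever; B's recursion diverges too).
def Pre_count_downstream_py (step_id : String) (children_map : List (String × List String)) : Prop :=
  ∀ s ∈ clo children_map [step_id], s ∉ clo children_map (cdGet children_map s)

instance (step_id : String) (children_map : List (String × List String)) : Decidable (Pre_count_downstream_py step_id children_map) := by unfold Pre_count_downstream_py; infer_instance

def pvWitness_count_downstream_py : String × (List (String × List String)) :=
  ("a", [("a", ["b", "b"]), ("b", ["c"])])

def Spec_count_downstream_py (step_id : String) (children_map : List (String × List String)) (out : Int) : Prop := out = count_downstream_py_alt step_id children_map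
instance (step_id : String) (children_map : List (String × List String)) (out : Int) : Decidable (Spec_count_downstream_py step_id children_map out) := by unfold Spec_count_downstream_py; infer_instance

-- ===== CLAIM (what is proved, stated in full; the proofs are below) =====
def Claim_equal_count_downstream_py : Prop := ∀ (step_id : String) (children_map : List (String × List String)), Dom_count_downstream_py step_id children_map → Pre_count_downstream_py step_id children_map → Spec_count_downstream_py step_id children_map (count_downstream_py step_id children_map)

-- ===== LEMMAS AND PROOFS =====

-- the denotation both ports reduce to: B's recursion at fuel g.length
def cd (g : List (String × List String)) (s : String) : Int := bCount g g.length s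

def cmKeys (g : List (String × List String)) : List String := g.map Prod.fst

-- dict.mk facts
lemma mk_get?_some_mem (g : List (String × List String)) (s : String) (v : List String)
    (h : (PySem.Dict.mk g).get? s = some v) : (s, v) ∈ g := by
  induction g with
  | nil => simp [PySem.Dict.get?] at h
  | cons p rest ih =>
    rcases p with ⟨k, w⟩
    rw [PySem.Dict.get?_mk_cons] at h
    by_cases hk : k = s
    · subst hk; simp at h; simp [h]
    · simp [hk] at h
      exact List.mem_cons_of_mem _ (ih h)

lemma cdGet_eq (g : List (String × List String)) (s : String) :
    cdGet g s = ((PySem.Dict.mk g).get? s).getD [] := by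
  simp [cdGet, PySem.Dict.getD_eq_get?_getD]

lemma cdGet_of_not_key (g : List (String × List String)) (s : String)
    (h : s ∉ cmKeys g) : cdGet g s = [] := by
  rw [cdGet_eq]
  cases hg : (PySem.Dict.mk g).get? s with
  | none => rfl
  | some v =>
    exact absurd (List.mem_map_of_mem (mk_get?_some_mem g s v hg)) h

lemma key_of_cdGet_ne_nil (g : List (String × List String)) (s : String)
    (h : cdGet g s ≠ []) : s ∈ cmKeys g := by
  by_contra hk
  exact h (cdGet_of_not_key g s hk)

lemma mem_cdGet_allCh (g : List (String × List String)) (s c : String)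
    (h : c ∈ cdGet g s) : c ∈ g.flatMap Prod.snd := by
  rw [cdGet_eq] at h
  cases hg : (PySem.Dict.mk g).get? s with
  | none => rw [hg] at h; simp at h
  | some v =>
    rw [hg] at h
    simp at h
    exact List.mem_flatMap.mpr ⟨(s, v), mk_get?_some_mem g s v hg, h⟩

-- closure facts
lemma subset_clStep (g : List (String × List String)) (S : List String) :
    ∀ x ∈ S, x ∈ clStep g S := by
  intro x hx
  simp [clStep, List.mem_dedup]
  exact Or.inl hx

lemma subset_clIter (g : List (String × List String)) (n : Nat) (S : List String) :
    ∀ x ∈ S, x ∈ clIter g n S := by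
  induction n with
  | zero => intro x hx; simpa [clIter] using hx
  | succ n ih =>
    intro x hx
    exact subset_clStep g _ x (ih x hx)

lemma clIter_elem (g : List (String × List String)) (n : Nat) (S : List String) :
    ∀ x ∈ clIter g n S, x ∈ S ∨ x ∈ g.flatMap Prod.snd := by
  induction n with
  | zero => intro x hx; exact Or.inl (by simpa [clIter] using hx)
  | succ n ih =>
    intro x hx
    simp only [clIter, clStep, List.mem_dedup, List.mem_append] at hx
    rcases hx with hx | hx
    · exact ih x hx
    · rcases List.mem_flatMap.mp hx with ⟨s, _, hc⟩
      exact Or.inr (mem_cdGet_allCh g s x hc)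

def StableS (g : List (String × List String)) (S : List String) : Prop :=
  ∀ s ∈ S, ∀ c ∈ cdGet g s, c ∈ S

lemma clStep_mem_of_stable (g : List (String × List String)) (S : List String)
    (h : StableS g S) : ∀ x, x ∈ clStep g S ↔ x ∈ S := by
  intro x
  constructor
  · intro hx
    simp only [clStep, List.mem_dedup, List.mem_append] at hx
    rcases hx with hx | hx
    · exact hx
    · rcases List.mem_flatMap.mp hx with ⟨s, hs, hc⟩
      exact h s hs x hc
  · exact subset_clStep g S x

lemma stable_congr (g : List (String × List String)) (S T : List String)
    (hm : ∀ x, x ∈ T ↔ x ∈ S) (h : StableS g S) : StableS g T := by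
  intro s hs c hc
  exact (hm c).mpr (h s ((hm s).mp hs) c hc)

lemma stable_clo (g : List (String × List String)) (S : List String) :
    StableS g (clo g S) := by
  have hQ : ∀ k, StableS g (clIter g k S) ∨
      S.toFinset.card + k ≤ (clIter g k S).toFinset.card := by
    intro k
    induction k with
    | zero => right; simp [clIter]
    | succ k ih =>
      by_cases hst : StableS g (clIter g k S)
      · left
        exact stable_congr g _ _ (clStep_mem_of_stable g _ hst) hst
      · rcases ih with h | h
        · exact absurd h hst
        · right
          unfold StableS at hst
          push Not at hst
          rcases hst with ⟨s, hs, c, hc, hcn⟩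
          have hsub : (clIter g k S).toFinset ⊆ (clIter g (k+1) S).toFinset := by
            intro x hx
            exact List.mem_toFinset.mpr (subset_clStep g _ x (List.mem_toFinset.mp hx))
          have hcin : c ∈ (clIter g (k+1) S).toFinset := by
            apply List.mem_toFinset.mpr
            show c ∈ clStep g (clIter g k S)
            simp only [clStep, List.mem_dedup, List.mem_append]
            exact Or.inr (List.mem_flatMap.mpr ⟨s, hs, hc⟩)
          have hss : (clIter g k S).toFinset ⊂ (clIter g (k+1) S).toFinset :=
            ⟨hsub, fun hsub' => hcn (List.mem_toFinset.mp (hsub' hcin))⟩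
          have := Finset.card_lt_card hss
          omega
  rcases hQ ((S ++ g.flatMap Prod.snd).length + 1) with h | h
  · exact h
  · exfalso
    have hb : (clIter g ((S ++ g.flatMap Prod.snd).length + 1) S).toFinset ⊆
        (S ++ g.flatMap Prod.snd).toFinset := by
      intro x hx
      have := clIter_elem g _ S x (List.mem_toFinset.mp hx)
      apply List.mem_toFinset.mpr
      simpa [List.mem_append] using this
    have h1 := Finset.card_le_card hb
    have h2 := (S ++ g.flatMap Prod.snd).toFinset_card_le
    omega

lemma clo_closed (g : List (String × List String)) (S : List String) (s c : String)
    (hs : s ∈ clo g S) (hc : c ∈ cdGet g s) : c ∈ clo g S :=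
  stable_clo g S s hs c hc

lemma subset_clo (g : List (String × List String)) (S : List String) :
    ∀ x ∈ S, x ∈ clo g S :=
  subset_clIter g _ S

-- pigeonhole
lemma nodup_length_le (V L : List String) (hd : V.Nodup) (hs : ∀ x ∈ V, x ∈ L) :
    V.length ≤ L.length := by
  calc V.length = V.toFinset.card := (List.toFinset_card_of_nodup hd).symm
    _ ≤ L.toFinset.card := Finset.card_le_card (by
        intro x hx
        exact List.mem_toFinset.mpr (hs x (List.mem_toFinset.mp hx)))
    _ ≤ L.length := L.toFinset_card_le

-- stabilisation of bCount under Pre_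
lemma bCount_nil (g : List (String × List String)) (s : String) (h : cdGet g s = []) :
    ∀ k, bCount g k s = 0 := by
  intro k
  cases k with
  | zero => rfl
  | succ k => simp [bCount, h]

lemma not_mem_anc (step_id : String) (g : List (String × List String))
    (hpre : Pre_count_downstream_py step_id g) (V : List String) (s : String)
    (hs : s ∈ clo g [step_id])
    (hV : ∀ v ∈ V, v ∈ clo g [step_id] ∧ v ∈ cmKeys g ∧ s ∈ clo g (cdGet g v)) :
    s ∉ V := by
  intro hmem
  exact hpre s hs ((hV s hmem).2.2)

lemma full_anc_nil (step_id : String) (g : List (String × List String))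
    (hpre : Pre_count_downstream_py step_id g) (V : List String) (s : String)
    (hs : s ∈ clo g [step_id]) (hnd : V.Nodup)
    (hV : ∀ v ∈ V, v ∈ clo g [step_id] ∧ v ∈ cmKeys g ∧ s ∈ clo g (cdGet g v))
    (hlen : g.length ≤ V.length) : cdGet g s = [] := by
  by_contra hne
  have hkey := key_of_cdGet_ne_nil g s hne
  have hsV := not_mem_anc step_id g hpre V s hs hV
  have hle : (s :: V).length ≤ (cmKeys g).length := by
    apply nodup_length_le _ _ (List.nodup_cons.mpr ⟨hsV, hnd⟩)
    intro x hx
    rcases List.mem_cons.mp hx with rfl | hx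
    · exact hkey
    · exact (hV x hx).2.1
  simp [cmKeys] at hle
  omega

lemma cd_stable (step_id : String) (g : List (String × List String))
    (hpre : Pre_count_downstream_py step_id g) :
    ∀ n m (V : List String) (s : String), s ∈ clo g [step_id] → V.Nodup →
      (∀ v ∈ V, v ∈ clo g [step_id] ∧ v ∈ cmKeys g ∧ s ∈ clo g (cdGet g v)) →
      g.length ≤ n + V.length → g.length ≤ m + V.length →
      bCount g n s = bCount g m s := by
  intro n
  induction n with
  | zero =>
    intro m V s hs hnd hV hn _
    have hnil := full_anc_nil step_id g hpre V s hs hnd hV (by omega)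
    rw [bCount_nil g s hnil m]
    rfl
  | succ a ih =>
    intro m V s hs hnd hV hn hm
    cases m with
    | zero =>
      have hnil := full_anc_nil step_id g hpre V s hs hnd hV (by omega)
      rw [bCount_nil g s hnil (a+1)]
      rfl
    | succ b =>
      by_cases hnil : cdGet g s = []
      · rw [bCount_nil g s hnil, bCount_nil g s hnil]
      · have hkey := key_of_cdGet_ne_nil g s hnil
        have hsV := not_mem_anc step_id g hpre V s hs hV
        show ((cdGet g s).map (fun c => 1 + bCount g a c)).sum
            = ((cdGet g s).map (fun c => 1 + bCount g b c)).sum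
        congr 1
        apply List.map_congr_left
        intro c hc
        have hcR : c ∈ clo g [step_id] := clo_closed g _ s c hs hc
        have hinv : ∀ v ∈ (s :: V), v ∈ clo g [step_id] ∧ v ∈ cmKeys g ∧
            c ∈ clo g (cdGet g v) := by
          intro v hv
          rcases List.mem_cons.mp hv with rfl | hv
          · exact ⟨hs, hkey, subset_clo g _ c hc⟩
          · exact ⟨(hV v hv).1, (hV v hv).2.1, clo_closed g _ s c (hV v hv).2.2 hc⟩
        have := ih b (s :: V) c hcR (List.nodup_cons.mpr ⟨hsV, hnd⟩) hinv
          (by simp; omega) (by simp; omega)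
        rw [this]

lemma cd_unfold (step_id : String) (g : List (String × List String))
    (hpre : Pre_count_downstream_py step_id g) (s : String) (hs : s ∈ clo g [step_id]) :
    cd g s = ((cdGet g s).map (fun c => 1 + cd g c)).sum := by
  by_cases hnil : cdGet g s = []
  · rw [hnil]
    simp [cd, bCount_nil g s hnil]
  · have hkey := key_of_cdGet_ne_nil g s hnil
    have hg : g.length ≠ 0 := by
      intro h0
      rw [List.length_eq_zero_iff.mp h0] at hkey
      simp [cmKeys] at hkey
    obtain ⟨l, hl⟩ : ∃ l, g.length = l + 1 := ⟨g.length - 1, by omega⟩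
    unfold cd
    rw [hl]
    show ((cdGet g s).map (fun c => 1 + bCount g l c)).sum = _
    congr 1
    apply List.map_congr_left
    intro c hc
    have hcR : c ∈ clo g [step_id] := clo_closed g _ s c hs hc
    have hst := cd_stable step_id g hpre l (l + 1) [s] c hcR (by simp)
      (by
        intro v hv
        rcases List.mem_cons.mp hv with rfl | hv
        · exact ⟨hs, hkey, subset_clo g _ c hc⟩
        · simp at hv)
      (by simp; omega) (by simp; omega)
    show 1 + bCount g l c = 1 + bCount g (l + 1) c
    rw [hst]

lemma bCount_nonneg (g : List (String × List String)) : ∀ n s, 0 ≤ bCount g n s := by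
  intro n
  induction n with
  | zero => intro s; simp [bCount]
  | succ n ih =>
    intro s
    apply List.sum_nonneg
    intro x hx
    rcases List.mem_map.mp hx with ⟨c, _, rfl⟩
    have := ih c
    omega

lemma cdGet_len_le_dmax (g : List (String × List String)) (s : String) :
    (cdGet g s).length ≤ dmax g := by
  rw [cdGet_eq]
  cases hg : (PySem.Dict.mk g).get? s with
  | none => simp [dmax]
  | some v =>
    have hv : (s, v) ∈ g := mk_get?_some_mem g s v hg
    have hmem : v.length ∈ g.map (fun p => p.2.length) := by
      exact List.mem_map.mpr ⟨(s, v), hv, rfl⟩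
    show v.length ≤ dmax g
    unfold dmax
    generalize g.map (fun p => p.2.length) = L at hmem
    induction L with
    | nil => simp at hmem
    | cons x xs ih =>
      rcases List.mem_cons.mp hmem with rfl | hmem
      · simp [List.foldr]
      · have := ih hmem
        simp only [List.foldr]
        omega

lemma sum_le_len_mul (l : List String) (f : String → Int) (B : Int)
    (h : ∀ x ∈ l, f x ≤ B) : (l.map f).sum ≤ (l.length : Int) * B := by
  induction l with
  | nil => simp
  | cons x xs ih =>
    have h1 : f x ≤ B := h x (List.mem_cons_self)
    have h2 := ih (fun y hy => h y (List.mem_cons_of_mem x hy))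
    simp only [List.map_cons, List.sum_cons, List.length_cons]
    push_cast
    nlinarith [h2]

lemma bCount_bound (g : List (String × List String)) : ∀ n s,
    bCount g n s + 1 ≤ ((dmax g : Int) + 1) ^ n := by
  intro n
  induction n with
  | zero => intro s; simp [bCount]
  | succ n ih =>
    intro s
    have hpow : (1 : Int) ≤ ((dmax g : Int) + 1) ^ n := by
      apply one_le_pow₀
      have : (0 : Int) ≤ (dmax g : Int) := Int.natCast_nonneg _
      omega
    have hsum : ((cdGet g s).map (fun c => 1 + bCount g n c)).sum
        ≤ ((cdGet g s).length : Int) * ((dmax g : Int) + 1) ^ n := by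
      apply sum_le_len_mul
      intro c _
      have := ih c
      omega
    have hlen : ((cdGet g s).length : Int) ≤ (dmax g : Int) := by
      exact_mod_cast cdGet_len_le_dmax g s
    show ((cdGet g s).map (fun c => 1 + bCount g n c)).sum + 1 ≤ _
    have hmul : ((cdGet g s).length : Int) * ((dmax g : Int) + 1) ^ n
        ≤ (dmax g : Int) * ((dmax g : Int) + 1) ^ n := by
      apply mul_le_mul_of_nonneg_right hlen
      omega
    have hexp : ((dmax g : Int) + 1) ^ (n + 1)
        = (dmax g : Int) * ((dmax g : Int) + 1) ^ n + ((dmax g : Int) + 1) ^ n := by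
      ring
    omega

-- the BFS loop computes the same denotation
lemma bfs_eq (step_id : String) (g : List (String × List String))
    (hpre : Pre_count_downstream_py step_id g) :
    ∀ (fuel : Nat) (count : Int) (queue : List String),
      (∀ q ∈ queue, q ∈ clo g [step_id]) →
      (queue.map (fun q => 1 + cd g q)).sum ≤ (fuel : Int) →
      bfsLoop g fuel count queue = count + (queue.map (fun q => 1 + cd g q)).sum := by
  intro fuel
  induction fuel with
  | zero =>
    intro count queue hmem hb
    cases queue with
    | nil => simp [bfsLoop]
    | cons q rest =>
      exfalso
      have h1 : 0 ≤ cd g q := bCount_nonneg g _ q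
      have h2 : 0 ≤ (rest.map (fun q => 1 + cd g q)).sum := by
        apply List.sum_nonneg
        intro x hx
        rcases List.mem_map.mp hx with ⟨c, _, rfl⟩
        have := bCount_nonneg g g.length c
        show 0 ≤ 1 + cd g c
        unfold cd
        omega
      simp only [List.map_cons, List.sum_cons, Nat.cast_zero] at hb
      omega
  | succ n ih =>
    intro count queue hmem hb
    cases queue with
    | nil => simp [bfsLoop]
    | cons q rest =>
      have hq : q ∈ clo g [step_id] := hmem q List.mem_cons_self
      have hrec := cd_unfold step_id g hpre q hq
      show bfsLoop g n (count + 1) (rest ++ cdGet g q) = _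
      have hsum : ((rest ++ cdGet g q).map (fun x => 1 + cd g x)).sum
          = (rest.map (fun x => 1 + cd g x)).sum + cd g q := by
        rw [List.map_append, List.sum_append, hrec]
      have hb' : ((rest ++ cdGet g q).map (fun x => 1 + cd g x)).sum ≤ (n : Int) := by
        rw [hsum]
        simp only [List.map_cons, List.sum_cons] at hb
        push_cast at hb ⊢
        omega
      have hmem' : ∀ x ∈ rest ++ cdGet g q, x ∈ clo g [step_id] := by
        intro x hx
        rcases List.mem_append.mp hx with hx | hx
        · exact hmem x (List.mem_cons_of_mem q hx)
        · exact clo_closed g _ q x hq hx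
      rw [ih (count + 1) (rest ++ cdGet g q) hmem' hb', hsum]
      simp only [List.map_cons, List.sum_cons]
      ring

lemma a_value (step_id : String) (g : List (String × List String))
    (hpre : Pre_count_downstream_py step_id g) :
    count_downstream_py step_id g = ((cdGet g step_id).map (fun q => 1 + cd g q)).sum := by
  unfold count_downstream_py
  have hstep : step_id ∈ clo g [step_id] := subset_clo g _ step_id (by simp)
  have hmem : ∀ q ∈ cdGet g step_id, q ∈ clo g [step_id] := by
    intro q hq
    exact clo_closed g _ step_id q hstep hq
  have hb : ((cdGet g step_id).map (fun q => 1 + cd g q)).sum ≤ ((fuelA g step_id : Nat) : Int) := by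
    have h1 : ((cdGet g step_id).map (fun q => 1 + cd g q)).sum
        ≤ ((cdGet g step_id).length : Int) * ((dmax g : Int) + 1) ^ g.length := by
      apply sum_le_len_mul
      intro q _
      have := bCount_bound g g.length q
      unfold cd
      omega
    unfold fuelA
    push_cast
    omega
  rw [bfs_eq step_id g hpre (fuelA g step_id) 0 (cdGet g step_id) hmem hb]
  simp

-- ===== VERDICT (by name: the statement is the Claim_ definition above) =====
theorem count_downstream_py_spec : Claim_equal_count_downstream_py := by
  intro step_id g _ hpre
  unfold Spec_count_downstream_py
  rw [a_value step_id g hpre]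
  rfl
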